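-- pv_equiv track=rewrite | github.com/Krishna2918/TradingBOT | src/portfolio_optimization/data_collection_orchestrator.py | _prioritize_symbols
-- ===== SOURCE A (Python) =====
-- from typing import List, Dict, Any, Optional
--
-- def _prioritize_symbols(symbols: List[str]) -> List[str]:
--     """Prioritize symbols for collection"""
--     # Separate Canadian and US symbols
--     canadian_symbols = [s for s in symbols if s.endswith('.TO')]
--     us_symbols = [s for s in symbols if not s.endswith('.TO')]
--
--     # Priority order: Canadian large caps, US large caps, others
--     priority_canadian = [
--         'RY.TO', 'TD.TO', 'BNS.TO', 'BMO.TO', 'CM.TO', 'SHOP.TO',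
--         'CNQ.TO', 'SU.TO', 'ENB.TO', 'TRP.TO', 'AEM.TO', 'ABX.TO'
--     ]
--
--     priority_us = [
--         'AAPL', 'MSFT', 'GOOGL', 'AMZN', 'META', 'TSLA', 'NVDA',
--         'JPM', 'JNJ', 'PG', 'KO', 'WMT', 'HD', 'BA', 'XOM', 'CVX'
--     ]
--
--     # Organize by priority
--     high_priority = []
--     medium_priority = []
--     low_priority = []
--
--     for symbol in symbols:
--         if symbol in priority_canadian or symbol in priority_us:
--             high_priority.append(symbol)
--         elif symbol.endswith('.TO') or symbol in us_symbols[:50]: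
--             medium_priority.append(symbol)
--         else:
--             low_priority.append(symbol)
--
--     return high_priority + medium_priority + low_priority
-- ===== SOURCE B (Python) =====
-- from typing import List
--
-- def _prioritize_symbols(symbols: List[str]) -> List[str]:
--     """Prioritize symbols for collection (stable key sort instead of bucket lists)."""
--     priority = {
--         'RY.TO', 'TD.TO', 'BNS.TO', 'BMO.TO', 'CM.TO', 'SHOP.TO',
--         'CNQ.TO', 'SU.TO', 'ENB.TO', 'TRP.TO', 'AEM.TO', 'ABX.TO',
--         'AAPL', 'MSFT', 'GOOGL', 'AMZN', 'META', 'TSLA', 'NVDA',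
--         'JPM', 'JNJ', 'PG', 'KO', 'WMT', 'HD', 'BA', 'XOM', 'CVX'
--     }
--     us_top = set([s for s in symbols if not s.endswith('.TO')][:50])
--
--     def key(s: str) -> int:
--         if s in priority:
--             return 0
--         if s.endswith('.TO') or s in us_top:
--             return 1
--         return 2
--
--     return sorted(symbols, key=key)
-- ===== Notes on version B (the rewrite author's own statement) =====
-- stated objective: idiomatic
-- what changed: Replaces A's three-bucket partition loop with accumulator lists by a single stable sort of the symbols under a 0/1/2 priority key computed from precomputed sets (priority set, first-50-US set), relying on sort stability for within-bucket order.
import Mathlib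
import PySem

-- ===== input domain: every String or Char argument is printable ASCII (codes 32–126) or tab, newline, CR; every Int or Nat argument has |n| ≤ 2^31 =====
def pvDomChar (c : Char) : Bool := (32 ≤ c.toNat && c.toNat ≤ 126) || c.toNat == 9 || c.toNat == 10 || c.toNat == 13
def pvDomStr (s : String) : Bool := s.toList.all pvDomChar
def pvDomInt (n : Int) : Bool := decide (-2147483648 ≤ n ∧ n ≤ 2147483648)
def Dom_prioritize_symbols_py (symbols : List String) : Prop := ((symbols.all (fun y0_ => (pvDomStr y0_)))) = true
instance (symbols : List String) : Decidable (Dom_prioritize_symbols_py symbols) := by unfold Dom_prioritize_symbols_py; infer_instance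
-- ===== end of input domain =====

-- B replaces A's three-bucket partition-and-concatenate loop with a single stable key sort (same cost class; more idiomatic).


-- ===== PORT A =====
def priorityCanadian : List String :=
  ["RY.TO", "TD.TO", "BNS.TO", "BMO.TO", "CM.TO", "SHOP.TO",
   "CNQ.TO", "SU.TO", "ENB.TO", "TRP.TO", "AEM.TO", "ABX.TO"]

def priorityUs : List String :=
  ["AAPL", "MSFT", "GOOGL", "AMZN", "META", "TSLA", "NVDA",
   "JPM", "JNJ", "PG", "KO", "WMT", "HD", "BA", "XOM", "CVX"]

def prioritize_symbols_py (symbols : List String) : List String :=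
  let _canadian_symbols := symbols.filter (fun s => PySem.Str.endswith s ".TO")
  let us_symbols := symbols.filter (fun s => ! PySem.Str.endswith s ".TO")
  let r := symbols.foldl
    (fun (acc : List String × List String × List String) symbol =>
      if priorityCanadian.contains symbol || priorityUs.contains symbol then
        (acc.1 ++ [symbol], acc.2.1, acc.2.2)
      else if PySem.Str.endswith symbol ".TO"
              || (PySem.List.slice us_symbols none (some 50)).contains symbol then
        (acc.1, acc.2.1 ++ [symbol], acc.2.2)
      else
        (acc.1, acc.2.1, acc.2.2 ++ [symbol]))
    ([], [], [])
  r.1 ++ r.2.1 ++ r.2.2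

-- ===== PORT B =====
def prioritySet : PySem.Set String :=
  PySem.Set.ofList
    ["RY.TO", "TD.TO", "BNS.TO", "BMO.TO", "CM.TO", "SHOP.TO",
     "CNQ.TO", "SU.TO", "ENB.TO", "TRP.TO", "AEM.TO", "ABX.TO",
     "AAPL", "MSFT", "GOOGL", "AMZN", "META", "TSLA", "NVDA",
     "JPM", "JNJ", "PG", "KO", "WMT", "HD", "BA", "XOM", "CVX"]

def prioritize_symbols_py_alt (symbols : List String) : List String :=
  let us_top : PySem.Set String :=
    PySem.Set.ofList
      (PySem.List.slice (symbols.filter (fun s => ! PySem.Str.endswith s ".TO")) none (some 50))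
  let key : String → Int := fun s =>
    if PySem.Set.contains prioritySet s then 0
    else if PySem.Str.endswith s ".TO" || PySem.Set.contains us_top s then 1
    else 2
  PySem.List.sorted symbols key false

-- ===== PRECONDITION & SPEC =====
def Spec_prioritize_symbols_py (symbols : List String) (out : List String) : Prop := out = prioritize_symbols_py_alt symbols
instance (symbols : List String) (out : List String) : Decidable (Spec_prioritize_symbols_py symbols out) := by unfold Spec_prioritize_symbols_py; infer_instance

-- ===== CLAIM (what is proved, stated in full; the proofs are below) =====
def Claim_equal_prioritize_symbols_py : Prop := ∀ (symbols : List String), Dom_prioritize_symbols_py symbols → Spec_prioritize_symbols_py symbols (prioritize_symbols_py symbols)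

-- ===== LEMMAS AND PROOFS =====

-- insertBy passes over a prefix it does not go before
theorem insertBy_pass {α : Type} (before : α → α → Bool) (x : α) (l r : List α)
    (h : ∀ y ∈ l, before x y = false) :
    PySem.List.insertBy before x (l ++ r) = l ++ PySem.List.insertBy before x r := by
  induction l with
  | nil => simp
  | cons y ys ih =>
    simp only [List.cons_append, PySem.List.insertBy, h y (by simp)]
    simp only [Bool.false_eq_true, if_false]
    rw [ih (fun z hz => h z (by simp [hz]))]

-- insertBy inserts at the front when it goes before everything
theorem insertBy_front {α : Type} (before : α → α → Bool) (x : α) (r : List α)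
    (h : ∀ y ∈ r, before x y = true) :
    PySem.List.insertBy before x r = x :: r := by
  cases r with
  | nil => rfl
  | cons y ys => simp [PySem.List.insertBy, h y (by simp)]

-- stable insertion sort with a {0,1,2}-valued key is the three-bucket concatenation
theorem foldl_insertBy_buckets {α : Type} (k : α → Int)
    (hk : ∀ x, k x = 0 ∨ k x = 1 ∨ k x = 2)
    (xs a b c : List α)
    (ha : ∀ x ∈ a, k x = 0) (hb : ∀ x ∈ b, k x = 1) (hc : ∀ x ∈ c, k x = 2) :
    xs.foldl (fun acc x => PySem.List.insertBy (fun p q => decide (k p < k q)) x acc)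
      (a ++ b ++ c)
    = (a ++ xs.filter (fun x => k x == 0)) ++ (b ++ xs.filter (fun x => k x == 1))
        ++ (c ++ xs.filter (fun x => k x == 2)) := by
  induction xs generalizing a b c with
  | nil => simp
  | cons x xs ih =>
    simp only [List.foldl_cons]
    rcases hk x with h0 | h1 | h2
    · have step : PySem.List.insertBy (fun p q => decide (k p < k q)) x (a ++ b ++ c)
          = (a ++ [x]) ++ b ++ c := by
        rw [List.append_assoc, insertBy_pass _ _ a (b ++ c)
          (fun y hy => by simp [ha y hy, h0]),
          insertBy_front _ _ (b ++ c) (fun y hy => by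
            rcases List.mem_append.mp hy with h | h
            · simp [hb y h, h0]
            · simp [hc y h, h0])]
        simp
      rw [step, ih (a ++ [x]) b c
        (fun y hy => by rcases List.mem_append.mp hy with h | h
                        · exact ha y h
                        · simp_all) hb hc]
      simp [h0]
    · have step : PySem.List.insertBy (fun p q => decide (k p < k q)) x (a ++ b ++ c)
          = a ++ (b ++ [x]) ++ c := by
        rw [List.append_assoc, insertBy_pass _ _ a (b ++ c)
          (fun y hy => by simp [ha y hy, h1]),
          insertBy_pass _ _ b c (fun y hy => by simp [hb y hy, h1]),
          insertBy_front _ _ c (fun y hy => by simp [hc y hy, h1])]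
        simp
      rw [step, ih a (b ++ [x]) c ha
        (fun y hy => by rcases List.mem_append.mp hy with h | h
                        · exact hb y h
                        · simp_all) hc]
      simp [h1]
    · have step : PySem.List.insertBy (fun p q => decide (k p < k q)) x (a ++ b ++ c)
          = a ++ b ++ (c ++ [x]) := by
        rw [PySem.List.insertBy_of_forall_not_before _ _ _ (fun y hy => by
          rcases List.mem_append.mp hy with h | h
          · rcases List.mem_append.mp h with h' | h'
            · simp [ha y h', h2]
            · simp [hb y h', h2]
          · simp [hc y h, h2])]
        simp
      rw [step, ih a b (c ++ [x]) ha hb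
        (fun y hy => by rcases List.mem_append.mp hy with h | h
                        · exact hc y h
                        · simp_all)]
      simp [h2]

-- A's three-accumulator loop is three filters
theorem foldl_three_buckets (p0 p1 : String → Bool) (xs h m l : List String) :
    xs.foldl
      (fun (acc : List String × List String × List String) s =>
        if p0 s then (acc.1 ++ [s], acc.2.1, acc.2.2)
        else if p1 s then (acc.1, acc.2.1 ++ [s], acc.2.2)
        else (acc.1, acc.2.1, acc.2.2 ++ [s])) (h, m, l)
    = (h ++ xs.filter p0, m ++ xs.filter (fun s => !p0 s && p1 s),
       l ++ xs.filter (fun s => !p0 s && !p1 s)) := by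
  induction xs generalizing h m l with
  | nil => simp
  | cons x xs ih =>
    by_cases h0 : p0 x
    · simp [List.foldl_cons, h0, ih]
    · by_cases h1 : p1 x <;> simp [List.foldl_cons, h0, h1, ih]

theorem set_ofList_contains (xs : List String) (y : String) :
    PySem.Set.contains (PySem.Set.ofList xs) y = xs.contains y := by
  simp only [PySem.Set.contains_eq_listContains]
  by_cases h : y ∈ xs <;>
    simp [h, PySem.Set.mem_ofList]

theorem prioritySet_contains (y : String) :
    PySem.Set.contains prioritySet y
      = (priorityCanadian.contains y || priorityUs.contains y) := by
  by_cases hc : y ∈ priorityCanadian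
  · fin_cases hc <;> decide
  · by_cases hu : y ∈ priorityUs
    · fin_cases hu <;> decide
    · rw [prioritySet, set_ofList_contains]
      simp only [priorityCanadian, priorityUs, List.mem_cons, List.not_mem_nil] at hc hu
      push Not at hc hu
      obtain ⟨c1,c2,c3,c4,c5,c6,c7,c8,c9,c10,c11,c12⟩ := hc
      obtain ⟨u1,u2,u3,u4,u5,u6,u7,u8,u9,u10,u11,u12,u13,u14,u15,u16⟩ := hu
      simp [priorityCanadian, priorityUs,
        c1,c2,c3,c4,c5,c6,c7,c8,c9,c10,c11,c12,
        u1,u2,u3,u4,u5,u6,u7,u8,u9,u10,u11,u12,u13,u14,u15,u16]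

-- ===== VERDICT (by name: the statement is the Claim_ definition above) =====
theorem prioritize_symbols_py_spec : Claim_equal_prioritize_symbols_py := by
  intro symbols _
  show prioritize_symbols_py symbols = prioritize_symbols_py_alt symbols
  simp only [prioritize_symbols_py, prioritize_symbols_py_alt]
  set us := symbols.filter (fun s => ! PySem.Str.endswith s ".TO") with hus
  set top := PySem.List.slice us none (some 50) with htop
  set key : String → Int := fun s =>
    if PySem.Set.contains prioritySet s then 0
    else if PySem.Str.endswith s ".TO" || PySem.Set.contains (PySem.Set.ofList top) s then 1
    else 2 with hkey
  rw [PySem.List.sorted_eq_foldl_insertBy]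
  have hbuckets := foldl_insertBy_buckets key
    (fun x => by
      rw [hkey]
      beta_reduce
      by_cases h0 : PySem.Set.contains prioritySet x
      · rw [if_pos h0]; left; rfl
      · rw [if_neg h0]
        by_cases h1 : (PySem.Str.endswith x ".TO" || PySem.Set.contains (PySem.Set.ofList top) x)
        · rw [if_pos h1]; right; left; rfl
        · rw [if_neg h1]; right; right; rfl)
    symbols [] [] [] (by simp) (by simp) (by simp)
  simp only [List.nil_append, List.append_nil] at hbuckets
  rw [hbuckets]
  rw [foldl_three_buckets
    (fun s => priorityCanadian.contains s || priorityUs.contains s)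
    (fun s => PySem.Str.endswith s ".TO" || top.contains s) symbols [] [] []]
  simp only [List.nil_append]
  have e0 : ∀ s, (key s == 0)
      = (priorityCanadian.contains s || priorityUs.contains s) := by
    intro s
    rw [hkey]
    beta_reduce
    rw [← prioritySet_contains s, set_ofList_contains]
    by_cases h0 : PySem.Set.contains prioritySet s
    · rw [if_pos h0, h0]; decide
    · rw [if_neg h0]
      rw [Bool.not_eq_true] at h0
      rw [h0]
      by_cases h1 : (PySem.Str.endswith s ".TO" || top.contains s) = true
      · rw [if_pos h1]; decide
      · rw [if_neg h1]; decide
  have e1 : ∀ s, (key s == 1)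
      = (!(priorityCanadian.contains s || priorityUs.contains s)
          && (PySem.Str.endswith s ".TO" || top.contains s)) := by
    intro s
    rw [hkey]
    beta_reduce
    rw [← prioritySet_contains s, set_ofList_contains]
    by_cases h0 : PySem.Set.contains prioritySet s
    · rw [if_pos h0, h0]; simp
    · rw [if_neg h0]
      rw [Bool.not_eq_true] at h0
      rw [h0]
      by_cases h1 : (PySem.Str.endswith s ".TO" || top.contains s) = true
      · rw [if_pos h1, h1]; decide
      · rw [if_neg h1]
        rw [Bool.not_eq_true] at h1
        rw [h1]; decide
  have e2 : ∀ s, (key s == 2)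
      = (!(priorityCanadian.contains s || priorityUs.contains s)
          && !(PySem.Str.endswith s ".TO" || top.contains s)) := by
    intro s
    rw [hkey]
    beta_reduce
    rw [← prioritySet_contains s, set_ofList_contains]
    by_cases h0 : PySem.Set.contains prioritySet s
    · rw [if_pos h0, h0]; simp
    · rw [if_neg h0]
      rw [Bool.not_eq_true] at h0
      rw [h0]
      by_cases h1 : (PySem.Str.endswith s ".TO" || top.contains s) = true
      · rw [if_pos h1, h1]; decide
      · rw [if_neg h1]
        rw [Bool.not_eq_true] at h1
        rw [h1]; decide
  rw [List.filter_congr (fun s _ => e0 s), List.filter_congr (fun s _ => e1 s),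
      List.filter_congr (fun s _ => e2 s)]
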